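-- pv_equiv track=rewrite | github.com/ksayee/programming_assignments | python/algorithms/fb_de_questions.py | UniqueNumber
-- ===== SOURCE A (Python) =====
-- def UniqueNumber(n):
--
--     lst={}
--     while(n!=0):
--         key=n%10
--         if key in lst.keys():
--             return False
--         else:
--             lst[key]=1
--         n=int(n/10)
--     return True
-- ===== SOURCE B (Python) =====
-- def UniqueNumber(n):
--     for d in range(10):
--         count = 0
--         m = n
--         while m != 0:
--             if m % 10 == d:
--                 count = count + 1
--             m = int(m / 10)
--         if count > 1:
--             return False
--     return True
-- ===== Notes on version B (the rewrite author's own statement) =====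
-- stated objective: alternative
-- what changed: Instead of one pass over the digits with a dict membership check and early exit, B iterates over the ten possible digit values and, for each, counts its occurrences along the same extraction chain (m%10, int(m/10)), returning False as soon as some digit value occurs more than once; no container is used at all.
import Mathlib
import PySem

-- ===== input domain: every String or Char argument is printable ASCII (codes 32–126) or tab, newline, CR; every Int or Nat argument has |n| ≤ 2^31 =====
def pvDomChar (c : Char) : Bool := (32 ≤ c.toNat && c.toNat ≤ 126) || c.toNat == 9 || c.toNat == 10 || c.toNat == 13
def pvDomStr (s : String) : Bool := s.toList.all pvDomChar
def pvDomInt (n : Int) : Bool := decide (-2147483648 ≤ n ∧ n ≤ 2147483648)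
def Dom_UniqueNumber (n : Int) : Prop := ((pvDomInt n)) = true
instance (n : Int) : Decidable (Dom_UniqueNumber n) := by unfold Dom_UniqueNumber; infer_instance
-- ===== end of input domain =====

-- B drops A's dict entirely: it loops over the ten possible digit values and counts each
-- one's occurrences along the same extraction chain (m%10, int(m/10)) — objective:
-- alternative algorithm (counting passes instead of a membership set), similar cost.

-- ===== PORT A =====
-- A's while loop as structural recursion on |n|; int(n/10) is exact truncating
-- division (Int.tdiv) for the |n| ≤ 2^31 inputs of Dom_
def UniqueNumberLoop (n : Int) (lst : PySem.Dict Int Int) : Bool :=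
  if n = 0 then true
  else
    let key := PySem.Int.mod n 10
    if lst.contains key then false
    else UniqueNumberLoop (n.tdiv 10) (lst.insert key 1)
termination_by n.natAbs
decreasing_by
  have h10 : (Int.tdiv n 10).natAbs = n.natAbs / 10 := Int.natAbs_tdiv n 10
  omega

def UniqueNumber (n : Int) : Bool := UniqueNumberLoop n PySem.Dict.empty

-- ===== PORT B =====
-- the inner counting while loop of Source B (count occurrences of digit d in m's chain)
def UniqueNumberCountLoop (m : Int) (count : Int) (d : Int) : Int :=
  if m = 0 then count
  else UniqueNumberCountLoop (m.tdiv 10)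
        (if PySem.Int.mod m 10 = d then count + 1 else count) d
termination_by m.natAbs
decreasing_by
  have h10 : (Int.tdiv m 10).natAbs = m.natAbs / 10 := Int.natAbs_tdiv m 10
  omega

-- the for-d-in-range(10) loop with its early 'return False' is an 'all' over the range
def UniqueNumber_alt (n : Int) : Bool :=
  (PySem.List.pyRange 0 10 1).all (fun d => !decide (UniqueNumberCountLoop n 0 d > 1))

-- ===== PRECONDITION & SPEC =====
def Spec_UniqueNumber (n : Int) (out : Bool) : Prop := out = UniqueNumber_alt n
instance (n : Int) (out : Bool) : Decidable (Spec_UniqueNumber n out) := by unfold Spec_UniqueNumber; infer_instance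

-- ===== CLAIM (what is proved, stated in full; the proofs are below) =====
def Claim_equal_UniqueNumber : Prop := ∀ (n : Int), Dom_UniqueNumber n → Spec_UniqueNumber n (UniqueNumber n)

-- ===== LEMMAS AND PROOFS =====

-- the digit chain both programs walk, as a list (proof-only helper)
def digitsOf (n : Int) : List Int :=
  if n = 0 then [] else PySem.Int.mod n 10 :: digitsOf (n.tdiv 10)
termination_by n.natAbs
decreasing_by
  have h10 : (Int.tdiv n 10).natAbs = n.natAbs / 10 := Int.natAbs_tdiv n 10
  omega

theorem mem_digitsOf {x n : Int} (hx : x ∈ digitsOf n) : 0 ≤ x ∧ x < 10 := by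
  rw [digitsOf] at hx
  by_cases h : n = 0
  · simp [h] at hx
  · simp only [if_neg h, List.mem_cons] at hx
    rcases hx with rfl | hx
    · exact ⟨PySem.Int.mod_nonneg n (by norm_num), PySem.Int.mod_lt n (by norm_num)⟩
    · exact mem_digitsOf hx
termination_by n.natAbs
decreasing_by
  have h10 : (Int.tdiv n 10).natAbs = n.natAbs / 10 := Int.natAbs_tdiv n 10
  omega

theorem countLoop_eq (m c d : Int) :
    UniqueNumberCountLoop m c d = c + ((digitsOf m).count d : Int) := by
  rw [UniqueNumberCountLoop, digitsOf]
  by_cases h : m = 0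
  · simp [h]
  · simp only [if_neg h]
    rw [countLoop_eq (m.tdiv 10)]
    simp only [List.count_cons,
      PySem.Int.mod_eq_emod_of_pos (a := m) (b := 10) (by norm_num), beq_iff_eq]
    split_ifs <;> push_cast <;> ring
termination_by m.natAbs
decreasing_by
  have h10 : (Int.tdiv m 10).natAbs = m.natAbs / 10 := Int.natAbs_tdiv m 10
  omega

theorem loop_eq_nodup (n : Int) (lst : PySem.Dict Int Int) :
    UniqueNumberLoop n lst =
      (decide (digitsOf n).Nodup && (digitsOf n).all (fun k => !(lst.contains k))) := by
  rw [UniqueNumberLoop, digitsOf]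
  by_cases h : n = 0
  · simp [h]
  · simp only [if_neg h]
    set k := PySem.Int.mod n 10 with hk
    cases hc : lst.contains k
    · rw [if_neg (by simp)]
      rw [loop_eq_nodup (n.tdiv 10) (lst.insert k 1)]
      rw [Bool.eq_iff_iff]
      simp only [Bool.and_eq_true, decide_eq_true_iff, List.all_eq_true,
        List.nodup_cons, List.mem_cons,
        PySem.Dict.contains_insert, Bool.not_eq_eq_eq_not, Bool.not_true,
        Bool.or_eq_false_iff, beq_eq_false_iff_ne, ne_eq]
      constructor
      · rintro ⟨hnd, hall⟩
        refine ⟨⟨fun hkD => (hall k hkD).1 rfl, hnd⟩, ?_⟩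
        rintro x (rfl | hx)
        · exact hc
        · exact (hall x hx).2
      · rintro ⟨⟨hkD, hnd⟩, hall⟩
        exact ⟨hnd, fun x hx => ⟨fun he => hkD (he ▸ hx), hall x (Or.inr hx)⟩⟩
    · symm
      simp [List.all_cons, hc]
termination_by n.natAbs
decreasing_by
  all_goals
    have h10 : (Int.tdiv n 10).natAbs = n.natAbs / 10 := Int.natAbs_tdiv n 10
    omega

-- ===== VERDICT (by name: the statement is the Claim_ definition above) =====
theorem UniqueNumber_spec : Claim_equal_UniqueNumber := by
  intro n _
  unfold Spec_UniqueNumber UniqueNumber UniqueNumber_alt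
  rw [loop_eq_nodup, Bool.eq_iff_iff]
  simp only [Bool.and_eq_true, decide_eq_true_iff, List.all_eq_true,
    PySem.Dict.contains_empty, Bool.not_false, implies_true, and_true,
    countLoop_eq, zero_add, Bool.not_eq_eq_eq_not, Bool.not_true,
    decide_eq_false_iff_not, not_lt, PySem.List.mem_pyRange_one]
  rw [List.nodup_iff_count_le_one]
  constructor
  · intro h d _
    exact_mod_cast h d
  · intro h a
    by_cases ha : a ∈ digitsOf n
    · have := mem_digitsOf ha
      exact_mod_cast h a this
    · simp [List.count_eq_zero_of_not_mem ha]
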